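-- pv_equiv track=rewrite | github.com/dhanrajsahoo0007/DATA-STRUCTURE-ALGORITHM | 08. Binary Search/05. Minimum | Maximum/08. [Hard] Maximum Running Time of N Computers.py | max_running_time
-- ===== SOURCE A (Python) =====
-- from typing import List
--
-- def can_run_for_time(n: int, batteries: List[int], time: int) -> bool:
--     total_power = 0
--     for battery in batteries:
--         if battery < time:
--             # If battery capacity is less than time, use all of it
--             total_power += battery
--         else:
--             # If battery capacity is more than time, we only need 'time' amount from it
--             total_power += time
--         if total_power >= n * time:
--             # If we have enough power to run all computers for 'time', return True
--             return True
--     # If we don't have enough power after using all batteries, return False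
--     return False
--
-- def max_running_time(n: int, batteries: List[int]) -> int:
--
--     # Initialize binary search range
--     left = 0
--     right = sum(batteries) // n  # Maximum possible running time
--
--     while left < right:
--         # Calculate the middle point, rounding up to avoid infinite loop
--         mid = left + (right - left + 1) // 2
--
--         if can_run_for_time(n, batteries, mid):
--             # If we can run for this time, try a longer time
--             left = mid
--         else:
--             # If we can't run for this time, try a shorter time
--             right = mid - 1
--
--     # Return the maximum time we can run all computers
--     return left
-- ===== SOURCE B (Python) =====
-- from typing import List
--
-- def max_running_time(n: int, batteries: List[int]) -> int:
--     # Greedy: any battery too large to drain fully is dedicated to one computer;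
--     # the rest share the remaining charge evenly.
--     total = sum(batteries)
--     if n <= 0 or total < n:
--         # no computers to run, or not even one unit of charge per computer
--         return 0
--     for b in sorted(batteries, reverse=True):
--         if b * n > total:
--             total -= b
--             n -= 1
--         else:
--             break
--     return total // n
-- ===== Notes on version B (the rewrite author's own statement) =====
-- stated objective: alternative
-- what changed: Replaces the binary search over the answer (each probe rescanning all batteries) by a single sort-then-greedy pass: batteries larger than the fair share are dedicated to one computer each, then the answer is the floor-average of the remaining charge.
-- outside the precondition, e.g. on max_running_time(1, [10, -10, 1]): A returns 1, B returns 0; on max_running_time(-2, [3, -5]): A returns 1, B returns 0; on max_running_time(1, [100, -5]): A returns 95, B returns 0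
import Mathlib
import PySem

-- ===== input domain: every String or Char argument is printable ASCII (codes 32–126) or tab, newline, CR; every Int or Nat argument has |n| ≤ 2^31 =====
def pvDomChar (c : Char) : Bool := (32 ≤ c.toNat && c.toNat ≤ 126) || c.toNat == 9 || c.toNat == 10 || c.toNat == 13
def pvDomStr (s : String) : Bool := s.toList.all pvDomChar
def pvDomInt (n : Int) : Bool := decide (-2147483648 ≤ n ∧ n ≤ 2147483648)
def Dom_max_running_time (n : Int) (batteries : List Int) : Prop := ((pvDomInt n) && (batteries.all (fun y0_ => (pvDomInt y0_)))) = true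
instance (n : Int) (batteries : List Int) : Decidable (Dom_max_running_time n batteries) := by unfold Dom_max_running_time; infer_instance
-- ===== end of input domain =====

-- B replaces A's binary search over the answer by a single sort + greedy pass (a structurally different algorithm; return value proved equal on Pre_).

-- ===== PORT A =====
-- early-exit loop of can_run_for_time
def pvCanRunGo (n time : Int) (total : Int) : List Int → Bool
  | [] => false
  | b :: rest =>
    let total' := total + (if b < time then b else time)
    if n * time ≤ total' then true else pvCanRunGo n time total' rest

def can_run_for_time (n : Int) (batteries : List Int) (time : Int) : Bool :=
  pvCanRunGo n time 0 batteries

-- the 'while left < right' loop of A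
def pvLoopA (n : Int) (batteries : List Int) (left right : Int) : Int :=
  if _h : left < right then
    let mid := left + PySem.Int.floordiv (right - left + 1) 2
    if can_run_for_time n batteries mid then pvLoopA n batteries mid right
    else pvLoopA n batteries left (mid - 1)
  else left
termination_by (right - left).toNat
decreasing_by
  · have h2 : PySem.Int.floordiv (right - left + 1) 2 = (right - left + 1) / 2 :=
      PySem.Int.floordiv_eq_ediv_of_pos (by norm_num)
    simp only [h2]; omega
  · have h2 : PySem.Int.floordiv (right - left + 1) 2 = (right - left + 1) / 2 :=
      PySem.Int.floordiv_eq_ediv_of_pos (by norm_num)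
    simp only [h2]; omega

def max_running_time (n : Int) (batteries : List Int) : Int :=
  pvLoopA n batteries 0 (PySem.Int.floordiv batteries.sum n)

-- ===== PORT B =====
-- the for-loop of B with its early break
def pvGoB (n total : Int) : List Int → Int
  | [] => PySem.Int.floordiv total n
  | b :: rest =>
    if total < b * n then pvGoB (n - 1) (total - b) rest
    else PySem.Int.floordiv total n

def max_running_time_alt (n : Int) (batteries : List Int) : Int :=
  if n ≤ 0 ∨ batteries.sum < n then 0
  else pvGoB n batteries.sum (PySem.List.sorted batteries (fun x => x) true)

-- ===== PRECONDITION & SPEC =====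
-- Pre_ excludes n = 0 (A raises ZeroDivisionError) and inputs carrying a negative battery
-- capacity outside the trivial region (1 ≤ n ≤ total, or n ≤ -1): capacities are nonnegative
-- in the problem's domain, and on such out-of-domain inputs A's early-exit feasibility scan is
-- order-dependent (A gives 95 on (1, [100, -5]) but 0 on (1, [-5, 100])), so no particular
-- value is the specified one there; B returns the value implied by the total-charge bound.
def Pre_max_running_time (n : Int) (batteries : List Int) : Prop :=
  (1 ≤ n ∧ ((∀ b ∈ batteries, 0 ≤ b) ∨ batteries.sum < n)) ∨
  (n ≤ -1 ∧ ∀ b ∈ batteries, 0 ≤ b)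
instance (n : Int) (batteries : List Int) : Decidable (Pre_max_running_time n batteries) := by
  unfold Pre_max_running_time; infer_instance

def pvWitness_max_running_time : Int × List Int := (2, [3, 3, 3])

def Spec_max_running_time (n : Int) (batteries : List Int) (out : Int) : Prop := out = max_running_time_alt n batteries
instance (n : Int) (batteries : List Int) (out : Int) : Decidable (Spec_max_running_time n batteries out) := by unfold Spec_max_running_time; infer_instance

-- ===== CLAIM (what is proved, stated in full; the proofs are below) =====
def Claim_equal_max_running_time : Prop := ∀ (n : Int) (batteries : List Int), Dom_max_running_time n batteries → Pre_max_running_time n batteries → Spec_max_running_time n batteries (max_running_time n batteries)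


-- ===== LEMMAS AND PROOFS =====

theorem pvLoopA_exit (n : Int) (bs : List Int) (left right : Int) (h : ¬ left < right) :
    pvLoopA n bs left right = left := by
  rw [pvLoopA]; simp [h]

-- Σ min(b, t): the power obtainable from the batteries in time t
def pvF (bs : List Int) (t : Int) : Int := (bs.map (fun b => min b t)).sum

theorem pvF_nil (t : Int) : pvF [] t = 0 := rfl

theorem pvF_cons (b : Int) (bs : List Int) (t : Int) :
    pvF (b :: bs) t = min b t + pvF bs t := by simp [pvF]

theorem pvF_le_sum (bs : List Int) (t : Int) : pvF bs t ≤ bs.sum := by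
  induction bs with
  | nil => simp [pvF]
  | cons b rest ih =>
      rw [pvF_cons, List.sum_cons]
      have : min b t ≤ b := min_le_left _ _
      omega

theorem pvF_nonneg (bs : List Int) (t : Int) (hb : ∀ b ∈ bs, 0 ≤ b) (ht : 0 ≤ t) :
    0 ≤ pvF bs t := by
  induction bs with
  | nil => simp [pvF]
  | cons b rest ih =>
      rw [pvF_cons]
      have h1 : 0 ≤ b := hb b (by simp)
      have h2 : 0 ≤ pvF rest t := ih (fun x hx => hb x (by simp [hx]))
      have : 0 ≤ min b t := le_min h1 ht
      omega

theorem pvF_eq_sum_of_all_le (bs : List Int) (t : Int) (h : ∀ b ∈ bs, b ≤ t) :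
    pvF bs t = bs.sum := by
  induction bs with
  | nil => simp [pvF]
  | cons b rest ih =>
      rw [pvF_cons, List.sum_cons, min_eq_left (h b (by simp)),
        ih (fun x hx => h x (by simp [hx]))]

theorem pvF_perm (bs bs' : List Int) (t : Int) (h : bs.Perm bs') : pvF bs t = pvF bs' t :=
  (h.map (fun b => min b t)).sum_eq

-- the feasibility predicate n*t ≤ pvF bs t is antitone in t (on nonneg t, nonneg batteries)
theorem pvP_antitone (n : Int) (bs : List Int) (hb : ∀ b ∈ bs, 0 ≤ b) {s t : Int}
    (hs : 0 ≤ s) (hst : s ≤ t) (h : n * t ≤ pvF bs t) : n * s ≤ pvF bs s := by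
  rcases eq_or_lt_of_le hst with rfl | hlt
  · exact h
  · have htpos : 0 < t := lt_of_le_of_lt hs hlt
    have key : ∀ b ∈ bs, min b t * s ≤ min b s * t := by
      intro b hbm
      have hb0 := hb b hbm
      rcases le_total b s with h1 | h1
      · rw [min_eq_left h1, min_eq_left (le_trans h1 hst)]
        exact mul_le_mul_of_nonneg_left hst hb0
      · rw [min_eq_right h1]
        have h2 : min b t ≤ t := min_le_right _ _
        have h3 : 0 ≤ min b t := le_min hb0 (le_of_lt htpos)
        nlinarith
    have hsum : pvF bs t * s ≤ pvF bs s * t := by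
      unfold pvF
      rw [← List.sum_map_mul_right, ← List.sum_map_mul_right]
      exact List.sum_le_sum key
    have h4 : n * t * s ≤ pvF bs t * s := mul_le_mul_of_nonneg_right h hs
    have h5 : n * s * t ≤ pvF bs s * t := by nlinarith
    exact le_of_mul_le_mul_right h5 htpos

-- can_run's early-exit loop computes exactly the predicate (on nonneg inputs)
theorem pvCanRunGo_iff (n t : Int) (ht : 0 ≤ t) :
    ∀ (bs : List Int) (total : Int), (∀ b ∈ bs, 0 ≤ b) →
      (pvCanRunGo n t total bs = true ↔ bs ≠ [] ∧ n * t ≤ total + pvF bs t) := by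
  intro bs
  induction bs with
  | nil => intro total _; simp [pvCanRunGo]
  | cons b rest ih =>
      intro total hb
      have hbmin : (if b < t then b else t) = min b t := by
        split_ifs with h1 <;> omega
      have hrest : ∀ x ∈ rest, 0 ≤ x := fun x hx => hb x (by simp [hx])
      rw [pvCanRunGo]
      simp only [hbmin]
      by_cases hc : n * t ≤ total + min b t
      · simp only [hc, if_pos]
        have hfr : 0 ≤ pvF rest t := pvF_nonneg rest t hrest ht
        simp only [pvF_cons]
        constructor
        · intro _; exact ⟨by simp, by omega⟩
        · intro _; trivial
      · simp only [hc, if_neg, not_false_iff]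
        rw [ih (total + min b t) hrest]
        rw [pvF_cons]
        constructor
        · rintro ⟨_, h2⟩; exact ⟨by simp, by omega⟩
        · rintro ⟨_, h2⟩
          constructor
          · intro hrn; subst hrn; simp [pvF_nil] at h2; omega
          · omega

-- A's binary search returns the unique r with P r ∧ ¬P (r+1)
theorem pvLoopA_spec (n : Int) (bs : List Int) (hbs : bs ≠ []) (hb : ∀ b ∈ bs, 0 ≤ b) :
    ∀ (k : Nat) (left right : Int), (right - left).toNat ≤ k → 0 ≤ left → left ≤ right →
      n * left ≤ pvF bs left → (∀ t, right < t → ¬ n * t ≤ pvF bs t) →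
      0 ≤ pvLoopA n bs left right ∧
      n * pvLoopA n bs left right ≤ pvF bs (pvLoopA n bs left right) ∧
      ¬ n * (pvLoopA n bs left right + 1) ≤ pvF bs (pvLoopA n bs left right + 1) := by
  intro k
  induction k with
  | zero =>
      intro left right hk h0 hlr hP hR
      have heq : left = right := by omega
      rw [pvLoopA]
      simp only [heq, lt_irrefl, dite_false]
      subst heq
      exact ⟨h0, hP, hR _ (by omega)⟩
  | succ k ih =>
      intro left right hk h0 hlr hP hR
      by_cases hlt : left < right
      · rw [pvLoopA]
        simp only [hlt, dite_true]
        have hdiv : PySem.Int.floordiv (right - left + 1) 2 = (right - left + 1) / 2 :=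
          PySem.Int.floordiv_eq_ediv_of_pos (by norm_num)
        set mid := left + PySem.Int.floordiv (right - left + 1) 2 with hmid
        have hm1 : left + 1 ≤ mid := by rw [hmid, hdiv]; omega
        have hm2 : mid ≤ right := by rw [hmid, hdiv]; omega
        have hciff := pvCanRunGo_iff n mid (by omega) bs 0 hb
        by_cases hc : can_run_for_time n bs mid = true
        · simp only [hc, if_true]
          have hPmid : n * mid ≤ pvF bs mid := by
            have := (hciff.mp hc).2; omega
          exact ih mid right (by omega) (by omega) hm2 hPmid hR
        · simp only [hc]
          have hnPmid : ¬ n * mid ≤ pvF bs mid := by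
            intro hcontra
            exact hc (hciff.mpr ⟨hbs, by omega⟩)
          refine ih left (mid - 1) (by omega) h0 (by omega) hP ?_
          intro t htm hPt
          exact hnPmid (pvP_antitone n bs hb (by omega) (by omega) hPt)
      · rw [pvLoopA]
        simp only [hlt, dite_false]
        have heq : left = right := by omega
        subst heq
        exact ⟨h0, hP, hR _ (by omega)⟩

-- B's greedy loop returns a value with the same characterisation
theorem pvGoB_spec :
    ∀ (bs : List Int) (n total : Int), 1 ≤ n → (∀ b ∈ bs, 0 ≤ b) → total = bs.sum →
      bs.Pairwise (fun a b => b ≤ a) →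
      0 ≤ pvGoB n total bs ∧
      n * pvGoB n total bs ≤ pvF bs (pvGoB n total bs) ∧
      ¬ n * (pvGoB n total bs + 1) ≤ pvF bs (pvGoB n total bs + 1) := by
  intro bs
  induction bs with
  | nil =>
      intro n total hn hb htot _
      subst htot
      simp only [List.sum_nil, pvGoB]
      rw [PySem.Int.floordiv_eq_ediv_of_pos (by omega)]
      simp [pvF_nil]
      omega
  | cons b rest ih =>
      intro n total hn hb htot hpw
      have hb0 : 0 ≤ b := hb b (by simp)
      have hrest : ∀ x ∈ rest, 0 ≤ x := fun x hx => hb x (by simp [hx])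
      have hsr : 0 ≤ rest.sum := List.sum_nonneg hrest
      rw [List.sum_cons] at htot
      rw [pvGoB]
      by_cases hcase : total < b * n
      · simp only [hcase, if_true]
        have hn2 : 2 ≤ n := by nlinarith
        obtain ⟨ih0, ih1, ih2⟩ := ih (n - 1) (total - b) (by omega) hrest (by omega)
          (List.Pairwise.of_cons hpw)
        set r := pvGoB (n - 1) (total - b) rest with hr
        have hfr : pvF rest r ≤ rest.sum := pvF_le_sum rest r
        have hrb : r < b := by nlinarith
        refine ⟨ih0, ?_, ?_⟩
        · rw [pvF_cons, min_eq_right (by omega)]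
          nlinarith
        · intro hcontra
          rw [pvF_cons, min_eq_right (by omega)] at hcontra
          exact ih2 (by nlinarith)
      · simp only [if_neg hcase]
        have hbn : b * n ≤ total := by omega
        rw [PySem.Int.floordiv_eq_ediv_of_pos (by omega)]
        set r := total / n with hr
        have htr : 0 ≤ total := by omega
        have hr0 : 0 ≤ r := Int.ediv_nonneg htr (by omega)
        have hbr : b ≤ r := Int.le_ediv_iff_mul_le (by omega) |>.mpr hbn
        have hall : ∀ x ∈ b :: rest, x ≤ r := by
          intro x hx
          rcases List.mem_cons.mp hx with rfl | hx'
          · exact hbr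
          · exact le_trans (List.rel_of_pairwise_cons hpw hx') hbr
        refine ⟨hr0, ?_, ?_⟩
        · rw [pvF_eq_sum_of_all_le _ _ hall, List.sum_cons, ← htot]
          have : r * n ≤ total := (Int.le_ediv_iff_mul_le (by omega)).mp (le_refl r)
          nlinarith
        · intro hcontra
          have h1 : pvF (b :: rest) (r + 1) ≤ total := by
            rw [htot]; exact pvF_le_sum _ _
          have h2 : total < (r + 1) * n := by
            have : r < r + 1 := by omega
            exact Int.ediv_lt_iff_lt_mul (by omega) |>.mp this
          nlinarith

-- uniqueness of the characterised value
theorem pvUnique (n : Int) (bs : List Int) (hb : ∀ b ∈ bs, 0 ≤ b) (r1 r2 : Int)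
    (h10 : 0 ≤ r1) (h11 : n * r1 ≤ pvF bs r1) (h12 : ¬ n * (r1 + 1) ≤ pvF bs (r1 + 1))
    (h20 : 0 ≤ r2) (h21 : n * r2 ≤ pvF bs r2) (h22 : ¬ n * (r2 + 1) ≤ pvF bs (r2 + 1)) :
    r1 = r2 := by
  rcases lt_trichotomy r1 r2 with h | h | h
  · exact absurd (pvP_antitone n bs hb (by omega) (by omega : r1 + 1 ≤ r2) h21) h12
  · exact h
  · exact absurd (pvP_antitone n bs hb (by omega) (by omega : r2 + 1 ≤ r1) h11) h22

-- ===== VERDICT (by name: the statement is the Claim_ definition above) =====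
theorem max_running_time_spec : Claim_equal_max_running_time := by
  intro n bs _ hpre
  unfold Spec_max_running_time max_running_time max_running_time_alt
  rcases hpre with ⟨hn, hrest⟩ | ⟨hn, hb⟩
  · by_cases hsum : bs.sum < n
    · -- trivial region: not even one unit of charge per computer, both sides return 0
      rw [if_pos (Or.inr hsum)]
      have hr : PySem.Int.floordiv bs.sum n < 1 := by
        rw [PySem.Int.floordiv_eq_ediv_of_pos (by omega)]
        exact (Int.ediv_lt_iff_lt_mul (by omega)).mpr (by omega)
      exact pvLoopA_exit n bs 0 _ (by omega)
    · -- main region: n ≥ 1 and every battery nonnegative, total charge ≥ n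
      have hb : ∀ b ∈ bs, 0 ≤ b := hrest.resolve_right hsum
      rw [if_neg (by omega : ¬ (n ≤ 0 ∨ bs.sum < n))]
      have hne : bs ≠ [] := by
        intro hnil; rw [hnil] at hsum; simp at hsum; omega
      have hsorted := PySem.List.sorted_perm bs (fun x => x) true
      have hsum' : (PySem.List.sorted bs (fun x => x) true).sum = bs.sum := hsorted.sum_eq
      have hbsorted : ∀ x ∈ PySem.List.sorted bs (fun x => x) true, 0 ≤ x := by
        intro x hx; exact hb x (hsorted.mem_iff.mp hx)
      have hpw : (PySem.List.sorted bs (fun x => x) true).Pairwise (fun a b => b ≤ a) :=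
        PySem.List.sorted_pairwise_rev bs (fun x => x)
      obtain ⟨g0, g1, g2⟩ := pvGoB_spec (PySem.List.sorted bs (fun x => x) true) n bs.sum hn
        hbsorted hsum'.symm hpw
      rw [pvF_perm _ bs _ hsorted] at g1 g2
      have hsum0 : 0 ≤ bs.sum := List.sum_nonneg hb
      have hright : PySem.Int.floordiv bs.sum n = bs.sum / n :=
        PySem.Int.floordiv_eq_ediv_of_pos (by omega)
      rw [hright]
      have hr0 : 0 ≤ bs.sum / n := Int.ediv_nonneg hsum0 (by omega)
      have hP0 : n * 0 ≤ pvF bs 0 := by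
        have : 0 ≤ pvF bs 0 := pvF_nonneg bs 0 hb (le_refl 0)
        omega
      have hR : ∀ t, bs.sum / n < t → ¬ n * t ≤ pvF bs t := by
        intro t htf hPt
        have h1 : pvF bs t ≤ bs.sum := pvF_le_sum bs t
        have h2 : bs.sum < t * n := (Int.ediv_lt_iff_lt_mul (by omega)).mp htf
        nlinarith
      obtain ⟨a0, a1, a2⟩ := pvLoopA_spec n bs hne hb (bs.sum / n - 0).toNat 0 (bs.sum / n)
        (le_refl _) (le_refl 0) hr0 hP0 hR
      exact pvUnique n bs hb _ _ a0 a1 a2 g0 g1 g2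
  · -- n ≤ -1 with nonnegative batteries: A's search range is empty, both return 0
    rw [if_pos (Or.inl (by omega))]
    have hsum0 : 0 ≤ bs.sum := List.sum_nonneg hb
    have hqr := PySem.Int.floordiv_mul_add_mod bs.sum n
    have hm := PySem.Int.mod_neg_bounds (a := bs.sum) (show n < 0 by omega)
    have hq : PySem.Int.floordiv bs.sum n ≤ 0 := by
      by_contra hq'
      have h1 : PySem.Int.floordiv bs.sum n * n ≤ 1 * n :=
        mul_le_mul_of_nonpos_right (by omega) (by omega)
      linarith
    exact pvLoopA_exit n bs 0 _ (by omega)
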